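-- pv_equiv track=rewrite | github.com/OzgurAytac/Hard_View_1.0 | HardView.py | _first_valid_serial
-- ===== SOURCE A (Python) =====
-- from typing import List, Optional
--
-- def _clean_str(x: Optional[str]) -> Optional[str]:
--     if x is None:
--         return None
--     if not isinstance(x, str):
--         try:
--             x = str(x)
--         except Exception:
--             return None
--     x = x.strip()
--     return x if x else None
--
-- def _is_valid_serial(s: Optional[str]) -> bool:
--     s = _clean_str(s)
--     if not s:
--         return False
--     s_norm = s.strip().upper()
--
--     invalid_markers = {
--         "TO BE FILLED BY O.E.M.",
--         "TO BE FILLED BY OEM",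
--         "DEFAULT STRING",
--         "SYSTEM SERIAL NUMBER",
--         "SYSTEMSERIALNUMBER",
--         "NONE",
--         "N/A",
--         "NA",
--         "NULL",
--         "0",
--         "00000000",
--         "000000000",
--         "0000000000",
--         "000000000000",
--         "123456789",
--         "SERIALNUMBER",
--     }
--     if s_norm in invalid_markers:
--         return False
--
--     stripped = "".join(ch for ch in s_norm if ch.isalnum())
--     if not stripped:
--         return False
--     if set(stripped) <= {"0"}:
--         return False
--     if set(stripped) <= {"F"}:
--         return False
--
--     return True
--
-- def _first_valid_serial(candidates: List[Optional[str]]) -> str: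
--     for c in candidates:
--         if _is_valid_serial(c):
--             return _clean_str(c) or "N/A"
--     for c in candidates:
--         c2 = _clean_str(c)
--         if c2:
--             return c2
--     return "N/A"
-- ===== SOURCE B (Python) =====
-- from typing import List, Optional
--
-- def _clean_str(x: Optional[str]) -> Optional[str]:
--     if x is None:
--         return None
--     if not isinstance(x, str):
--         try:
--             x = str(x)
--         except Exception:
--             return None
--     x = x.strip()
--     return x if x else None
--
-- def _is_valid_serial(s: Optional[str]) -> bool:
--     s = _clean_str(s)
--     if not s:
--         return False
--     s_norm = s.strip().upper()
--
--     invalid_markers = {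
--         "TO BE FILLED BY O.E.M.",
--         "TO BE FILLED BY OEM",
--         "DEFAULT STRING",
--         "SYSTEM SERIAL NUMBER",
--         "SYSTEMSERIALNUMBER",
--         "NONE",
--         "N/A",
--         "NA",
--         "NULL",
--         "0",
--         "00000000",
--         "000000000",
--         "0000000000",
--         "000000000000",
--         "123456789",
--         "SERIALNUMBER",
--     }
--     if s_norm in invalid_markers:
--         return False
--
--     stripped = "".join(ch for ch in s_norm if ch.isalnum())
--     if not stripped:
--         return False
--     if set(stripped) <= {"0"}:
--         return False
--     if set(stripped) <= {"F"}:
--         return False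
--
--     return True
--
-- def _first_valid_serial(candidates: List[Optional[str]]) -> str:
--     # Single pass: return on the first valid serial, remembering the first
--     # non-empty cleaned candidate as a fallback.
--     fallback = None
--     for c in candidates:
--         if _is_valid_serial(c):
--             return _clean_str(c) or "N/A"
--         if fallback is None:
--             c2 = _clean_str(c)
--             if c2:
--                 fallback = c2
--     return fallback or "N/A"
-- ===== Notes on version B (the rewrite author's own statement) =====
-- stated objective: simpler
-- what changed: The two sequential scans of the candidate list (first for a valid serial, then for any non-empty cleaned string) are merged into one pass that remembers the first non-empty cleaned candidate as a fallback while searching for the first valid serial.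
import Mathlib
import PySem

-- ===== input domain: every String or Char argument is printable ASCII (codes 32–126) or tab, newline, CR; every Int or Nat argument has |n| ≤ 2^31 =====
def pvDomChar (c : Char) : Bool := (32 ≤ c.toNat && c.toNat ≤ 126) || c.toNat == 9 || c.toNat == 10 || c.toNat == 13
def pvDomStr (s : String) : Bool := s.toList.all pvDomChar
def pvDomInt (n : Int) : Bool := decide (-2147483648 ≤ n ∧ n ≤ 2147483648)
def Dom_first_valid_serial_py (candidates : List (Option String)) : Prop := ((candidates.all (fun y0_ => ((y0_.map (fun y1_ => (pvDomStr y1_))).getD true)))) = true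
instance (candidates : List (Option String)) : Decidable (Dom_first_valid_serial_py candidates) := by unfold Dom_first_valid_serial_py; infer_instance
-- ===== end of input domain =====

-- B merges A's two sequential scans into a single pass that remembers the first
-- non-empty cleaned candidate as a fallback while searching for the first valid
-- serial (objective: simpler). Shared helpers _clean_str/_is_valid_serial are kept.

-- ===== PORT A =====
-- _clean_str: inputs are Optional[str], so the isinstance branch never fires.
def pvCleanStr (x : Option String) : Option String :=
  match x with
  | none => none
  | some s =>
    let t := PySem.Str.strip s
    if t = "" then none else some t

def pvInvalidMarkers : List String :=
  ["TO BE FILLED BY O.E.M.", "TO BE FILLED BY OEM", "DEFAULT STRING",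
   "SYSTEM SERIAL NUMBER", "SYSTEMSERIALNUMBER", "NONE", "N/A", "NA", "NULL",
   "0", "00000000", "000000000", "0000000000", "000000000000", "123456789",
   "SERIALNUMBER"]

-- _is_valid_serial; "".join(ch for ch in s_norm if ch.isalnum()) is kept as the
-- filtered char list (all later uses read it character by character / as a set).
def pvIsValidSerial (s : Option String) : Bool :=
  match pvCleanStr s with
  | none => false
  | some s =>
    let s_norm := PySem.Str.upper (PySem.Str.strip s)
    if pvInvalidMarkers.contains s_norm then false
    else
      let stripped := s_norm.toList.filter PySem.Chars.isalnum
      if stripped = [] then false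
      else if PySem.Set.issubset (PySem.Set.ofList stripped) ['0'] then false
      else if PySem.Set.issubset (PySem.Set.ofList stripped) ['F'] then false
      else true

-- first loop of A: first valid candidate, returned as `_clean_str(c) or "N/A"`
def pvFirstPass : List (Option String) → Option String
  | [] => none
  | c :: rest =>
    if pvIsValidSerial c then
      some (match pvCleanStr c with | some t => t | none => "N/A")
    else pvFirstPass rest

-- second loop of A: first non-empty cleaned candidate
def pvSecondPass : List (Option String) → Option String
  | [] => none
  | c :: rest =>
    match pvCleanStr c with
    | some t => some t
    | none => pvSecondPass rest

def first_valid_serial_py (candidates : List (Option String)) : String :=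
  match pvFirstPass candidates with
  | some r => r
  | none =>
    match pvSecondPass candidates with
    | some r => r
    | none => "N/A"

-- ===== PORT B =====
-- single loop with the `fallback` accumulator, as in Source B
def pvAltLoop : List (Option String) → Option String → String
  | [], fallback => match fallback with | some r => r | none => "N/A"
  | c :: rest, fallback =>
    if pvIsValidSerial c then
      match pvCleanStr c with | some t => t | none => "N/A"
    else
      match fallback with
      | some _ => pvAltLoop rest fallback
      | none =>
        match pvCleanStr c with
        | some c2 => pvAltLoop rest (some c2)
        | none => pvAltLoop rest none

def first_valid_serial_py_alt (candidates : List (Option String)) : String :=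
  pvAltLoop candidates none

-- ===== PRECONDITION & SPEC =====
def Spec_first_valid_serial_py (candidates : List (Option String)) (out : String) : Prop := out = first_valid_serial_py_alt candidates
instance (candidates : List (Option String)) (out : String) : Decidable (Spec_first_valid_serial_py candidates out) := by unfold Spec_first_valid_serial_py; infer_instance

-- ===== CLAIM (what is proved, stated in full; the proofs are below) =====
def Claim_equal_first_valid_serial_py : Prop := ∀ (candidates : List (Option String)), Dom_first_valid_serial_py candidates → Spec_first_valid_serial_py candidates (first_valid_serial_py candidates)

-- ===== LEMMAS AND PROOFS =====

-- Loop invariant: B's loop equals "first pass, else fallback, else second pass".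
theorem pvAltLoop_eq (cs : List (Option String)) (fb : Option String) :
    pvAltLoop cs fb =
      match pvFirstPass cs with
      | some r => r
      | none =>
        match fb with
        | some r => r
        | none => match pvSecondPass cs with | some r => r | none => "N/A" := by
  induction cs generalizing fb with
  | nil => cases fb <;> simp [pvAltLoop, pvFirstPass, pvSecondPass]
  | cons c rest ih =>
    by_cases hv : pvIsValidSerial c
    · simp [pvAltLoop, pvFirstPass, hv]
    · cases hfb : fb with
      | some r =>
        simp [pvAltLoop, pvFirstPass, hv, ih]
      | none =>
        cases hc : pvCleanStr c with
        | some c2 => simp [pvAltLoop, pvFirstPass, pvSecondPass, hv, hc, ih]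
        | none => simp [pvAltLoop, pvFirstPass, pvSecondPass, hv, hc, ih]

-- ===== VERDICT (by name: the statement is the Claim_ definition above) =====
theorem first_valid_serial_py_spec : Claim_equal_first_valid_serial_py := by
  intro candidates _
  unfold Spec_first_valid_serial_py first_valid_serial_py first_valid_serial_py_alt
  rw [pvAltLoop_eq]
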